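-- pv_equiv track=rewrite | github.com/psurge1/stock_discordpy_bot | stockbot.py | camel_case_to_sentence
-- ===== SOURCE A (Python) =====
-- def camel_case_to_sentence(s):
--     r = ""
--     r += s[0].upper()
--     for i in range(1, len(s)):
--         if s[i].isupper():
--             r += " "
--         r += s[i]
--     return r
-- ===== SOURCE B (Python) =====
-- def _run(t):
--     # length of the leading run of non-uppercase characters of t
--     n = 0
--     while n < len(t) and not t[n].isupper():
--         n += 1
--     return n
--
--
-- def _words(t):
--     # split t into segments, each starting at its first character and
--     # extending over the following non-uppercase run
--     if not t:
--         return []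
--     k = 1 + _run(t[1:])
--     return [t[:k]] + _words(t[k:])
--
--
-- def camel_case_to_sentence(s):
--     head = s[0].upper()
--     t = s[1:]
--     k = _run(t)
--     parts = [t[:k]] + _words(t[k:])
--     return head + " ".join(parts)
-- ===== Notes on version B (the rewrite author's own statement) =====
-- stated objective: alternative
-- what changed: B splits the tail into uppercase-led word segments (leading run + recursive word split) and assembles the result with one space-join over the segment list, instead of A's single char-by-char loop that appends a space before each uppercase character.
import Mathlib
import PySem

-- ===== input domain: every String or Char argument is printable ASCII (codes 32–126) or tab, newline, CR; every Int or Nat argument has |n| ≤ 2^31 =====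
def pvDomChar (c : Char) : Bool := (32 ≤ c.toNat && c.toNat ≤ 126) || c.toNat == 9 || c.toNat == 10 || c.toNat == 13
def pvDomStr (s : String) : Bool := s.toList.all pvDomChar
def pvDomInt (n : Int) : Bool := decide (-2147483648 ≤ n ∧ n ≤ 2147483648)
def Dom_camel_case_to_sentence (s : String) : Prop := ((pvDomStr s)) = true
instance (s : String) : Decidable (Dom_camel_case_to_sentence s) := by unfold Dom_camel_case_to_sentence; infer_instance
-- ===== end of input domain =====

-- B splits the tail into uppercase-led word segments and joins them with single spaces (alternative decomposition,
-- same cost); A concatenates character by character, appending a space before each uppercase character.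
-- Both raise IndexError on the empty string (s[0]); Pre_ excludes it.


-- ===== PORT A =====
-- r = ""; r += s[0].upper(); for i in range(1, len(s)): if s[i].isupper(): r += " "; r += s[i]
def camel_case_to_sentence (s : String) : String :=
  let cs := s.toList
  match PySem.List.pyGet? cs 0 with
  | none => ""      -- IndexError on the empty string: excluded by Pre_
  | some c0 =>
    let r : List Char := [] ++ [PySem.Chars.upperChar c0]
    let r := (PySem.List.pyRange 1 (cs.length : Int)).foldl
      (fun r i =>
        (if PySem.Chars.isupper (PySem.List.pyGetD cs i ' ') then r ++ [' '] else r)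
          ++ [PySem.List.pyGetD cs i ' ']) r
    String.ofList r

-- ===== PORT B =====
-- _run(t): length of the leading run of non-uppercase characters
def pvRun : List Char → Nat
  | [] => 0
  | c :: t => if PySem.Chars.isupper c then 0 else pvRun t + 1

-- _words(t): if not t: []; k = 1 + _run(t[1:]); [t[:k]] + _words(t[k:])
def pvWords : List Char → List (List Char)
  | [] => []
  | c :: t =>
    ((c :: t).take (1 + pvRun t)) :: pvWords ((c :: t).drop (1 + pvRun t))
termination_by b => b.length
decreasing_by simp [List.length_drop]

-- head = s[0].upper(); t = s[1:]; k = _run(t); parts = [t[:k]] + _words(t[k:]); head + " ".join(parts)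
def camel_case_to_sentence_alt (s : String) : String :=
  match s.toList with
  | [] => ""        -- s[0] raises IndexError here too: excluded by Pre_
  | c :: t =>
    String.ofList (PySem.Chars.upperChar c ::
      PySem.Chars.join [' '] (t.take (pvRun t) :: pvWords (t.drop (pvRun t))))

-- ===== PRECONDITION & SPEC =====
-- A (and B) raise IndexError on the empty string; Pre_ excludes exactly that input.
def Pre_camel_case_to_sentence (s : String) : Prop := s ≠ ""
instance (s : String) : Decidable (Pre_camel_case_to_sentence s) := by
  unfold Pre_camel_case_to_sentence; infer_instance
def pvWitness_camel_case_to_sentence : String := "helloWorld"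

def Spec_camel_case_to_sentence (s : String) (out : String) : Prop := out = camel_case_to_sentence_alt s
instance (s : String) (out : String) : Decidable (Spec_camel_case_to_sentence s out) := by unfold Spec_camel_case_to_sentence; infer_instance

-- ===== CLAIM (what is proved, stated in full; the proofs are below) =====
def Claim_equal_camel_case_to_sentence : Prop := ∀ (s : String), Dom_camel_case_to_sentence s → Pre_camel_case_to_sentence s → Spec_camel_case_to_sentence s (camel_case_to_sentence s)

-- ===== LEMMAS AND PROOFS =====

-- the piece each character contributes in A
def pvF (c : Char) : List Char := if PySem.Chars.isupper c then [' ', c] else [c]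

lemma pvTake_run (t : List Char) :
    t.take (pvRun t) = t.takeWhile (fun c => !PySem.Chars.isupper c) := by
  induction t with
  | nil => rfl
  | cons c t ih =>
    by_cases h : PySem.Chars.isupper c = true <;> simp [pvRun, List.takeWhile, h, ih]

lemma pvDrop_run (t : List Char) :
    t.drop (pvRun t) = t.dropWhile (fun c => !PySem.Chars.isupper c) := by
  induction t with
  | nil => rfl
  | cons c t ih =>
    by_cases h : PySem.Chars.isupper c = true <;> simp [pvRun, List.dropWhile, h, ih]

lemma pvFlatMap_takeWhile (t : List Char) :
    (t.takeWhile (fun c => !PySem.Chars.isupper c)).flatMap pvF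
      = t.takeWhile (fun c => !PySem.Chars.isupper c) := by
  induction t with
  | nil => rfl
  | cons c t ih =>
    by_cases h : PySem.Chars.isupper c = true <;>
      simp [List.takeWhile, h, pvF, ih]

lemma pvHead_dropWhile_upper : ∀ (t : List Char) (d : Char) (t'' : List Char),
    t.dropWhile (fun c => !PySem.Chars.isupper c) = d :: t'' → PySem.Chars.isupper d = true := by
  intro t
  induction t with
  | nil => intro d t'' h; cases h
  | cons c t ih =>
    intro d t'' h
    by_cases hc : PySem.Chars.isupper c = true
    · rw [List.dropWhile_cons_of_neg (by simp [hc])] at h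
      cases h; exact hc
    · rw [List.dropWhile_cons_of_pos (by simp [hc])] at h
      exact ih d t'' h

lemma pvJoin_words : ∀ (n : Nat) (b : List Char), b.length ≤ n →
    (∀ c t', b = c :: t' → PySem.Chars.isupper c = true) →
    PySem.Chars.join [' '] (pvWords b) = (b.flatMap pvF).drop 1 := by
  intro n
  induction n with
  | zero =>
    intro b hb _
    have : b = [] := List.eq_nil_of_length_eq_zero (Nat.le_zero.mp hb)
    subst this; simp [pvWords, PySem.Chars.join_nil]
  | succ n ih =>
    intro b hb hhead
    match b with
    | [] => simp [pvWords, PySem.Chars.join_nil]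
    | c :: t =>
      have hc : PySem.Chars.isupper c = true := hhead c t rfl
      have htw := pvFlatMap_takeWhile t
      have hsplit : t.takeWhile (fun c => !PySem.Chars.isupper c)
          ++ t.dropWhile (fun c => !PySem.Chars.isupper c) = t := List.takeWhile_append_dropWhile
      rw [pvWords]
      have htake : (c :: t).take (1 + pvRun t) = c :: t.take (pvRun t) := by
        rw [Nat.add_comm]; rfl
      have hdrop : (c :: t).drop (1 + pvRun t) = t.drop (pvRun t) := by
        rw [Nat.add_comm]; rfl
      rw [htake, hdrop, pvTake_run, pvDrop_run]
      cases hdw : t.dropWhile (fun c => !PySem.Chars.isupper c) with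
      | nil =>
        have ht := hsplit
        rw [hdw] at ht; simp only [List.append_nil] at ht
        have hft : List.flatMap pvF t = t := by
          conv_lhs => rw [← ht]
          rw [htw]; exact ht
        simp [pvWords, PySem.Chars.join_singleton, pvF, hc, ht, hft]
      | cons d t'' =>
        have hd : PySem.Chars.isupper d = true := pvHead_dropWhile_upper t d t'' hdw
        have hlen : (d :: t'').length ≤ n := by
          have h1 : (t.dropWhile (fun c => !PySem.Chars.isupper c)).length ≤ t.length :=
            List.length_dropWhile_le _ _
          rw [hdw] at h1
          simp at hb; omega
        have hrec := ih (d :: t'') hlen (by intro c' t' h; cases h; exact hd)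
        have hflat : List.flatMap pvF t
            = t.takeWhile (fun c => !PySem.Chars.isupper c) ++ (pvF d ++ List.flatMap pvF t'') := by
          conv_lhs => rw [← hsplit, hdw]
          simp [htw]
        have hwcons : pvWords (d :: t'')
            = ((d :: t'').take (1 + pvRun t'')) :: pvWords ((d :: t'').drop (1 + pvRun t'')) := by
          rw [pvWords]
        rw [hwcons, PySem.Chars.join_cons_cons, ← hwcons, hrec]
        simp [pvF, hc, hd, hflat]

lemma pvFoldl_A (init : List Char) (t : List Char) :
    t.foldl (fun r c => (if PySem.Chars.isupper c then r ++ [' '] else r) ++ [c]) init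
      = init ++ t.flatMap pvF := by
  have hstep : (fun (r : List Char) c =>
      (if PySem.Chars.isupper c then r ++ [' '] else r) ++ [c])
      = fun r c => r ++ pvF c := by
    funext r c; by_cases h : PySem.Chars.isupper c = true <;> simp [pvF, h]
  rw [hstep, PySem.List.foldl_append_eq_flatMap]

lemma pvJoin_parts (t : List Char) :
    PySem.Chars.join [' '] (t.take (pvRun t) :: pvWords (t.drop (pvRun t)))
      = t.flatMap pvF := by
  have htw := pvFlatMap_takeWhile t
  have hsplit : t.takeWhile (fun c => !PySem.Chars.isupper c)
      ++ t.dropWhile (fun c => !PySem.Chars.isupper c) = t := List.takeWhile_append_dropWhile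
  rw [pvTake_run, pvDrop_run]
  cases hdw : t.dropWhile (fun c => !PySem.Chars.isupper c) with
  | nil =>
    have ht := hsplit
    rw [hdw] at ht; simp only [List.append_nil] at ht
    have hft : List.flatMap pvF t = t := by
      conv_lhs => rw [← ht]
      rw [htw]; exact ht
    simp [pvWords, PySem.Chars.join_singleton, ht, hft]
  | cons d t'' =>
    have hd : PySem.Chars.isupper d = true := pvHead_dropWhile_upper t d t'' hdw
    have hrec := pvJoin_words (d :: t'').length (d :: t'') le_rfl
      (by intro c' t' h; cases h; exact hd)
    have hflat : List.flatMap pvF t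
        = t.takeWhile (fun c => !PySem.Chars.isupper c) ++ (pvF d ++ List.flatMap pvF t'') := by
      conv_lhs => rw [← hsplit, hdw]
      simp [htw]
    have hwcons : pvWords (d :: t'')
        = ((d :: t'').take (1 + pvRun t'')) :: pvWords ((d :: t'').drop (1 + pvRun t'')) := by
      rw [pvWords]
    rw [hwcons, PySem.Chars.join_cons_cons, ← hwcons, hrec]
    simp [pvF, hd, hflat]

-- ===== VERDICT (by name: the statement is the Claim_ definition above) =====
theorem camel_case_to_sentence_spec : Claim_equal_camel_case_to_sentence := by
  intro s _ hpre
  unfold Spec_camel_case_to_sentence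
  have hne : s.toList ≠ [] := by
    intro h
    exact hpre (by cases s; simp_all)
  cases hcs : s.toList with
  | nil => exact absurd hcs hne
  | cons c t =>
    unfold camel_case_to_sentence camel_case_to_sentence_alt
    rw [hcs]
    have hget : PySem.List.pyGet? (c :: t) (0 : Int) = some c := by
      simp [PySem.List.pyGet?, PySem.List.pyIdx?]
    simp only [hget]
    rw [show ((c :: t).length : Int) = (((c :: t).length : Nat) : Int) by simp,
      PySem.List.foldl_pyRange_pyGetD' (c :: t) ' '
        (fun r ci => (if PySem.Chars.isupper ci then r ++ [' '] else r) ++ [ci])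
        ([] ++ [PySem.Chars.upperChar c]) (a := 1) (by omega)]
    simp only [Int.toNat_one, List.drop_one, List.tail_cons]
    rw [pvFoldl_A, pvJoin_parts]
    simp
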